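-- pv_equiv track=rewrite | github.com/madhav-sharma/aamantran-backend-v0 | whatsapp-api/src/whatsapp_api/db_operations.py | get_phone_class
-- ===== SOURCE A (Python) =====
-- from typing import List, Optional, Dict, Any
--
-- COUNTRY_CODE_COLORS = {
--     '1': 'cc-usacan',    # USA/Canada
--     '971': 'cc-uae',     # UAE
--     '44': 'cc-uk',       # UK
--     '91': 'cc-in',       # India
-- }
--
-- def get_phone_class(phone: Optional[str]) -> str:
--     """Get CSS class based on phone country code"""
--     if not phone or not phone.startswith('+'):
--         return 'cc-other'
--
--     # Extract country code (1-3 digits after +)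
--     for length in [3, 2, 1]:
--         if len(phone) > length:
--             prefix = phone[1:length+1]
--             if prefix in COUNTRY_CODE_COLORS:
--                 return COUNTRY_CODE_COLORS[prefix]
--
--     return 'cc-other'
-- ===== SOURCE B (Python) =====
-- COUNTRY_CODE_COLORS = {
--     '1': 'cc-usacan',    # USA/Canada
--     '971': 'cc-uae',     # UAE
--     '44': 'cc-uk',       # UK
--     '91': 'cc-in',       # India
-- }
--
-- def get_phone_class(phone):
--     """Get CSS class based on phone country code"""
--     if not phone or not phone.startswith('+'):
--         return 'cc-other'
--     p = phone[1:4]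
--     matches = [code for code in COUNTRY_CODE_COLORS if p.startswith(code)]
--     if not matches:
--         return 'cc-other'
--     return COUNTRY_CODE_COLORS[max(matches, key=len)]
-- ===== Notes on version B (the rewrite author's own statement) =====
-- stated objective: alternative
-- what changed: Instead of looping over candidate prefix lengths [3,2,1] with slice-and-dict-lookup and early return, B slices the first three digits once, collects ALL table codes that prefix them via a comprehension, and resolves longest-prefix priority afterwards with max(matches, key=len).
import Mathlib
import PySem

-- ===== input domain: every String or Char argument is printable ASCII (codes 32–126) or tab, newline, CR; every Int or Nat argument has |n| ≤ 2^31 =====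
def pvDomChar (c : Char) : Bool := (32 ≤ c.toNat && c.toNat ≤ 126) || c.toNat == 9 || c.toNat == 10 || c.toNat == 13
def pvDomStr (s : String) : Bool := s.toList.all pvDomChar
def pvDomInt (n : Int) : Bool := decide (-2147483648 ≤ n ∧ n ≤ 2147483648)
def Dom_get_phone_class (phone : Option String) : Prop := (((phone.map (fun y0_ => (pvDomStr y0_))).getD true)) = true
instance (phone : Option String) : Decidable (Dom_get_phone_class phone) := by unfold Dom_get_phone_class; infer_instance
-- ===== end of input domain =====

-- B replaces A's early-return loop over prefix lengths (slice + dict lookup per length) by one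
-- slice of the first three digits, a comprehension collecting every matching table code, and a
-- final max-by-length to resolve longest-prefix priority (objective: alternative).

-- ===== PORT A =====
-- the module-level dict; str keys/values are code-point lists/Strings (Python str equality = code-point list equality)
def pvCcColors : PySem.Dict (List Char) String :=
  PySem.Dict.ofList [(['1'], "cc-usacan"), (['9','7','1'], "cc-uae"), (['4','4'], "cc-uk"), (['9','1'], "cc-in")]

-- the 'for length in [3, 2, 1]' loop: first dict hit returns, else fall through to 'cc-other'
def pvALoop (cs : List Char) : List Int → String
  | [] => "cc-other"
  | l :: rest =>
    if l < (cs.length : Int) then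
      let pre := PySem.Chars.slice cs (some 1) (some (l + 1))
      match pvCcColors.get? pre with
      | some c => c
      | none => pvALoop cs rest
    else pvALoop cs rest

def get_phone_class (phone : Option String) : String :=
  match phone with
  | none => "cc-other"
  | some p =>
    if p.toList.isEmpty || !(PySem.Chars.startswith p.toList ['+']) then "cc-other"
    else pvALoop p.toList [3, 2, 1]

-- ===== PORT B =====
-- 'matches = [code for code in COUNTRY_CODE_COLORS if p.startswith(code)]'
def pvBMatches (p : List Char) : List (List Char) :=
  pvCcColors.keys.filter (fun code => PySem.Chars.startswith p code)

def get_phone_class_alt (phone : Option String) : String :=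
  match phone with
  | none => "cc-other"
  | some s =>
    if s.toList.isEmpty || !(PySem.Chars.startswith s.toList ['+']) then "cc-other"
    else
      let p := PySem.Chars.slice s.toList (some 1) (some 4)
      match PySem.List.max? (pvBMatches p) (fun c => c.length) with
      | none => "cc-other"
      | some best => (pvCcColors.get? best).getD "cc-other"  -- dict[best]: best is a key, lookup always hits

-- ===== PRECONDITION & SPEC =====
def Spec_get_phone_class (phone : Option String) (out : String) : Prop := out = get_phone_class_alt phone
instance (phone : Option String) (out : String) : Decidable (Spec_get_phone_class phone out) := by unfold Spec_get_phone_class; infer_instance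

-- ===== CLAIM (what is proved, stated in full; the proofs are below) =====
def Claim_equal_get_phone_class : Prop := ∀ (phone : Option String), Dom_get_phone_class phone → Spec_get_phone_class phone (get_phone_class phone)

-- ===== LEMMAS AND PROOFS =====

-- pvCcColors as a literal association list, and its key list
theorem pvCcColors_mk :
    pvCcColors = PySem.Dict.mk [(['1'], "cc-usacan"), (['9','7','1'], "cc-uae"), (['4','4'], "cc-uk"), (['9','1'], "cc-in")] := by
  decide

theorem pvCcKeys_eq : pvCcColors.keys = [['1'], ['9','7','1'], ['4','4'], ['9','1']] := by decide

-- the core: on '+' :: t the length loop and the collect-then-max pipeline agree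
set_option maxHeartbeats 1000000 in
theorem pvCore_eq (t : List Char) :
    pvALoop ('+' :: t) [3, 2, 1] =
      (match PySem.List.max? (pvBMatches (PySem.Chars.slice ('+' :: t) (some 1) (some 4)))
          (fun c => c.length) with
        | none => "cc-other"
        | some best => (pvCcColors.get? best).getD "cc-other") := by
  match t with
  | [] => decide
  | [a] =>
    simp only [pvALoop, pvBMatches, pvCcKeys_eq, pvCcColors_mk]
    simp [PySem.List.slice, PySem.List.clampIdx, PySem.Chars.startswith, List.isPrefixOf,
      PySem.Dict.get?, PySem.List.max?, List.filter, List.find?, List.beq]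
    cases h1 : ('1' == a) <;> simp_all [List.find?, List.filter, List.foldl]
  | [a, b] =>
    simp only [pvALoop, pvBMatches, pvCcKeys_eq, pvCcColors_mk]
    simp [PySem.List.slice, PySem.List.clampIdx, PySem.Chars.startswith, List.isPrefixOf,
      PySem.Dict.get?, PySem.List.max?, List.filter, List.find?, List.beq]
    cases h1 : ('1' == a) <;> cases h2 : ('4' == a) <;> cases h3 : ('9' == a) <;>
      cases h4 : ('4' == b) <;> cases h5 : ('1' == b) <;>
      simp_all [List.foldl, beq_iff_eq]
  | a :: b :: c :: r =>
    simp only [pvALoop, pvBMatches, pvCcKeys_eq, pvCcColors_mk]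
    simp [PySem.List.slice, PySem.List.clampIdx, PySem.Chars.startswith, List.isPrefixOf,
      PySem.Dict.get?, PySem.List.max?, List.filter, List.find?, List.beq]
    cases h1 : ('1' == a) <;> cases h2 : ('4' == a) <;> cases h3 : ('9' == a) <;>
      cases h4 : ('4' == b) <;> cases h5 : ('1' == b) <;> cases h6 : ('7' == b) <;>
      cases h7 : ('1' == c) <;>
      simp_all [List.foldl, beq_iff_eq] <;> omega

-- ===== VERDICT (by name: the statement is the Claim_ definition above) =====
theorem get_phone_class_spec : Claim_equal_get_phone_class := by
  intro phone _
  unfold Spec_get_phone_class get_phone_class get_phone_class_alt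
  match phone with
  | none => rfl
  | some p =>
    by_cases h : p.toList.isEmpty || !(PySem.Chars.startswith p.toList ['+'])
    · simp [h]
    · simp only [h, Bool.false_eq_true, if_false]
      simp only [Bool.or_eq_true, not_or, Bool.not_eq_true,] at h
      obtain ⟨h1, h2⟩ := h
      have h2' : PySem.Chars.startswith p.toList ['+'] = true := by simpa using h2
      obtain ⟨t, ht⟩ : ∃ t, p.toList = '+' :: t := by
        rw [PySem.Chars.startswith_iff] at h2'
        obtain ⟨u, hu⟩ := h2'
        exact ⟨u, hu.symm⟩
      rw [ht]
      exact pvCore_eq t
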